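-- pv_equiv track=rewrite | github.com/YongweiXu/retracted_flask_vue | flask/Co-occurrence Matrix.py | most_frequent_combination
-- ===== SOURCE A (Python) =====
-- def most_frequent_combination(lists_of_strings):
--     def co_occurrence_matrix(lists_of_strings):
--         # 构建词汇表
--         vocabulary = set()
--         for string_list in lists_of_strings:
--             vocabulary.update(string_list)
--         vocabulary = sorted(list(vocabulary))
--
--         # 初始化共现矩阵
--         matrix = [[0] * len(vocabulary) for _ in range(len(vocabulary))]
--         # 填充共现矩阵
--         for string_list in lists_of_strings:
--             for i, word1 in enumerate(vocabulary):
--                 if word1 in string_list: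
--                     for j, word2 in enumerate(vocabulary):
--                         if word2 in string_list and word1 != word2:
--                             matrix[i][j] += 1
--
--         return matrix, vocabulary
--
--     matrix, vocabulary = co_occurrence_matrix(lists_of_strings)
--
--     max_count = 0
--     max_combinations = []
--     for i in range(len(vocabulary)):
--         for j in range(i + 1, len(vocabulary)):
--             if matrix[i][j] > max_count:
--                 max_count = matrix[i][j]
--                 max_combinations = [(vocabulary[i], vocabulary[j])]
--             elif matrix[i][j] == max_count:
--                 max_combinations.append((vocabulary[i], vocabulary[j]))
--
--     return max_count, max_combinations
-- ===== SOURCE B (Python) =====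
-- def most_frequent_combination(lists_of_strings):
--     vocabulary = sorted(set(w for lst in lists_of_strings for w in lst))
--     counts = {}
--     for lst in lists_of_strings:
--         uniq = sorted(set(lst))
--         for idx, w1 in enumerate(uniq):
--             for w2 in uniq[idx + 1:]:
--                 pair = (w1, w2)
--                 counts[pair] = counts.get(pair, 0) + 1
--     max_count = 0
--     max_combinations = []
--     for i, w1 in enumerate(vocabulary):
--         for w2 in vocabulary[i + 1:]:
--             c = counts.get((w1, w2), 0)
--             if c > max_count:
--                 max_count = c
--                 max_combinations = [(w1, w2)]
--             elif c == max_count: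
--                 max_combinations.append((w1, w2))
--     return max_count, max_combinations
-- ===== Notes on version B (the rewrite author's own statement) =====
-- stated objective: faster
-- what changed: Replaces the V x V co-occurrence matrix filled by scanning every list with membership tests (O(L*V^2*k)) by a pair-counting dict built from each list's distinct words (O(L*k^2 + V^2) with O(1) lookups in the final scan).
import Mathlib
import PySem

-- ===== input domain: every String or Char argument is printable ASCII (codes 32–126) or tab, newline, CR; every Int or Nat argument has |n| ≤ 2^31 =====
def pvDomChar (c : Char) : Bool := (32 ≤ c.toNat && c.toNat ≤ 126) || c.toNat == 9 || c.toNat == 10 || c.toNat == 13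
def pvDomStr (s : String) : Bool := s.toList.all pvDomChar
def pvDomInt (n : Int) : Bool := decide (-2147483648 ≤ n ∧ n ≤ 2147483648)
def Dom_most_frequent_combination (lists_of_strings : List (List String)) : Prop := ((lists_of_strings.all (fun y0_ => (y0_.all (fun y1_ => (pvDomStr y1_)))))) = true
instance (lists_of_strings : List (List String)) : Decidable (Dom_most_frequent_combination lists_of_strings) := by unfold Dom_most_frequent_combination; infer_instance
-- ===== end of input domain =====

-- B replaces the V x V matrix filled by scanning every list with a per-list pair-count dict; proved to return the same value.


-- ===== PORT A =====
def most_frequent_combination (lists_of_strings : List (List String)) : Int × (List (String × String)) :=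
  -- co_occurrence_matrix: vocabulary = sorted(set updated with every list)
  let vocab0 : PySem.Set String :=
    lists_of_strings.foldl (fun s string_list => PySem.Set.update s string_list) PySem.Set.empty
  let vocabulary : List String := PySem.List.sorted vocab0 (fun x => x)
  -- matrix = [[0] * len(vocabulary) for _ in range(len(vocabulary))]
  let matrix0 : List (List Int) :=
    (PySem.List.pyRange 0 (PySem.List.len vocabulary)).map
      (fun _ => PySem.List.pyRepeat [(0 : Int)] (PySem.List.len vocabulary))
  -- fill the co-occurrence matrix
  let matrix : List (List Int) :=
    lists_of_strings.foldl (fun matrix string_list =>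
      (PySem.List.enumerate vocabulary).foldl (fun matrix iw =>
        if string_list.contains iw.2 then
          (PySem.List.enumerate vocabulary).foldl (fun matrix jw =>
            if string_list.contains jw.2 && !(iw.2 == jw.2) then
              -- matrix[i][j] += 1 (indices come from enumerate(vocabulary): always in range)
              PySem.List.pySetD matrix iw.1
                (PySem.List.pySetD (PySem.List.pyGetD matrix iw.1 []) jw.1
                  (PySem.List.pyGetD (PySem.List.pyGetD matrix iw.1 []) jw.1 0 + 1))
            else matrix) matrix
        else matrix) matrix) matrix0
  -- final scan over the upper triangle
  (PySem.List.pyRange 0 (PySem.List.len vocabulary)).foldl (fun st i =>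
    (PySem.List.pyRange (i + 1) (PySem.List.len vocabulary)).foldl (fun st j =>
      if st.1 < PySem.List.pyGetD (PySem.List.pyGetD matrix i []) j 0 then
        (PySem.List.pyGetD (PySem.List.pyGetD matrix i []) j 0,
         [(PySem.List.pyGetD vocabulary i "", PySem.List.pyGetD vocabulary j "")])
      else if PySem.List.pyGetD (PySem.List.pyGetD matrix i []) j 0 = st.1 then
        (st.1, st.2 ++ [(PySem.List.pyGetD vocabulary i "", PySem.List.pyGetD vocabulary j "")])
      else st) st) ((0 : Int), ([] : List (String × String)))

-- ===== PORT B =====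
def most_frequent_combination_alt (lists_of_strings : List (List String)) : Int × (List (String × String)) :=
  let vocabulary : List String :=
    PySem.List.sorted (PySem.Set.ofList (lists_of_strings.flatMap (fun lst => lst))) (fun x => x)
  -- counts[(w1, w2)] for w1 < w2 over each list's distinct words
  let counts : PySem.Dict (String × String) Int :=
    lists_of_strings.foldl (fun counts lst =>
      let uniq := PySem.List.sorted (PySem.Set.ofList lst) (fun x => x)
      (PySem.List.enumerate uniq).foldl (fun counts iw =>
        (PySem.List.slice uniq (some (iw.1 + 1)) none).foldl (fun counts w2 =>
          counts.insert (iw.2, w2) (counts.getD (iw.2, w2) 0 + 1)) counts) counts)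
      PySem.Dict.empty
  -- scan the vocabulary pairs, looking each pair up in the dict
  (PySem.List.enumerate vocabulary).foldl (fun st iw =>
    (PySem.List.slice vocabulary (some (iw.1 + 1)) none).foldl (fun st w2 =>
      if st.1 < counts.getD (iw.2, w2) 0 then (counts.getD (iw.2, w2) 0, [(iw.2, w2)])
      else if counts.getD (iw.2, w2) 0 = st.1 then (st.1, st.2 ++ [(iw.2, w2)])
      else st) st) ((0 : Int), ([] : List (String × String)))

-- ===== PRECONDITION & SPEC =====
def Spec_most_frequent_combination (lists_of_strings : List (List String)) (out : Int × (List (String × String))) : Prop := out = most_frequent_combination_alt lists_of_strings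
instance (lists_of_strings : List (List String)) (out : Int × (List (String × String))) : Decidable (Spec_most_frequent_combination lists_of_strings out) := by unfold Spec_most_frequent_combination; infer_instance

-- ===== CLAIM (what is proved, stated in full; the proofs are below) =====
def Claim_equal_most_frequent_combination : Prop := ∀ (lists_of_strings : List (List String)), Dom_most_frequent_combination lists_of_strings → Spec_most_frequent_combination lists_of_strings (most_frequent_combination lists_of_strings)

-- ===== LEMMAS AND PROOFS =====


-- ---------- proof-only definitions ----------

def pvVocab (ls : List (List String)) : List String :=
  PySem.List.sorted (PySem.Set.ofList (ls.flatMap (fun l => l))) (fun x => x)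

def pvUniq (l : List String) : List String :=
  PySem.List.sorted (PySem.Set.ofList l) (fun x => x)

def pvEnt (m : List (List Int)) (i j : Nat) : Int := (m.getD i []).getD j 0

def pvUpd (m : List (List Int)) (i j : Nat) : List (List Int) :=
  m.set i ((m.getD i []).set j ((m.getD i []).getD j 0 + 1))

def pvShape (n : Nat) (m : List (List Int)) : Prop := m.length = n ∧ ∀ r ∈ m, r.length = n

def pvFillStep (V l : List String) (m : List (List Int)) : List (List Int) :=
  (List.range V.length).foldl (fun m i =>
    if l.contains (V.getD i "") then
      (List.range V.length).foldl (fun m j =>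
        if l.contains (V.getD j "") && !(V.getD i "" == V.getD j "") then pvUpd m i j else m) m
    else m) m

def pvInit (n : Nat) : List (List Int) := (List.range n).map (fun _ => List.replicate n (0 : Int))

def pvMat (ls : List (List String)) : List (List Int) :=
  ls.foldl (fun m l => pvFillStep (pvVocab ls) l m) (pvInit (pvVocab ls).length)

def pvCnt (ls : List (List String)) (w1 w2 : String) : Int :=
  (ls.countP (fun l => l.contains w1 && l.contains w2) : Int)

def pvPairsU (u : List String) : List (String × String) :=
  (List.range u.length).flatMap (fun k => (u.drop (k + 1)).map (fun w2 => (u.getD k "", w2)))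

def pvCounts (ls : List (List String)) : PySem.Dict (String × String) Int :=
  ls.foldl (fun counts lst =>
    let uniq := PySem.List.sorted (PySem.Set.ofList lst) (fun x => x)
    (PySem.List.enumerate uniq).foldl (fun counts iw =>
      (PySem.List.slice uniq (some (iw.1 + 1)) none).foldl (fun counts w2 =>
        counts.insert (iw.2, w2) (counts.getD (iw.2, w2) 0 + 1)) counts) counts)
    PySem.Dict.empty

def pvStep (c : Int) (w1 w2 : String) (st : Int × List (String × String)) :
    Int × List (String × String) :=
  if st.1 < c then (c, [(w1, w2)]) else if c = st.1 then (st.1, st.2 ++ [(w1, w2)]) else st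

def pvScan (ls : List (List String)) : Int × List (String × String) :=
  (List.range (pvVocab ls).length).foldl (fun st i =>
    ((pvVocab ls).drop (i + 1)).foldl (fun st w2 =>
      pvStep (pvCnt ls ((pvVocab ls).getD i "") w2) ((pvVocab ls).getD i "") w2 st) st)
    ((0 : Int), ([] : List (String × String)))

-- ---------- generic normalisation ----------

theorem pv_enum_foldl {beta : Type} (xs : List String) (f : beta -> Int × String -> beta) (init : beta) :
    (PySem.List.enumerate xs).foldl f init =
      (List.range xs.length).foldl (fun (acc : beta) (k : Nat) => f acc ((k : Int), xs.getD k "")) init := by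
  rw [PySem.List.enumerate_eq_map_pyRange xs "",
    show PySem.List.len xs = (xs.length : Int) from PySem.List.len_eq xs, PySem.List.pyRange_zero_nat]
  simp only [List.foldl_map, PySem.List.pyGetD_natCast]

theorem pv_vocab0_eq (ls : List (List String)) :
    ls.foldl (fun s l => PySem.Set.update s l) PySem.Set.empty =
      PySem.Set.ofList (ls.flatMap (fun l => l)) := by
  rw [PySem.Set.ofList_eq_foldl, List.foldl_flatMap]; rfl

-- ---------- A side: the matrix ----------

theorem pvShape_upd {n : Nat} {m : List (List Int)} (h : pvShape n m) {i : Nat} (j : Nat)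
    (hi : i < n) : pvShape n (pvUpd m i j) := by
  obtain ⟨hlen, hrows⟩ := h
  refine ⟨by simp [pvUpd, hlen], ?_⟩
  intro r hr
  rcases List.mem_or_eq_of_mem_set hr with hmem | heq
  · exact hrows r hmem
  · subst heq
    rw [List.length_set]
    have hi' : i < m.length := by omega
    rw [List.getD_eq_getElem m [] hi']
    exact hrows _ (List.getElem_mem hi')

theorem pvEnt_upd {n : Nat} {m : List (List Int)} (h : pvShape n m) {i j : Nat}
    (hi : i < n) (hj : j < n) (i' j' : Nat) :
    pvEnt (pvUpd m i j) i' j' = if i' = i ∧ j' = j then pvEnt m i j + 1 else pvEnt m i' j' := by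
  obtain ⟨hlen, hrows⟩ := h
  have hi' : i < m.length := by omega
  have hrowlen : (m.getD i []).length = n := by
    rw [List.getD_eq_getElem m [] hi']; exact hrows _ (List.getElem_mem hi')
  have hj' : j < (m.getD i []).length := by omega
  simp only [pvEnt, pvUpd, List.getD_eq_getElem?_getD, List.getElem?_set]
  rw [List.getD_eq_getElem?_getD] at hj'
  by_cases hii : i = i'
  · subst hii
    simp only [if_pos hi']
    by_cases hjj : j = j'
    · subst hjj
      simp [hj']
    · simp [hjj, Ne.symm hjj]
  · simp [hii, Ne.symm hii]

theorem pvEnt_bump {n : Nat} (I : Nat) (hI : I < n) (K : List Nat) :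
    K.Nodup → (∀ j ∈ K, j < n) →
    ∀ m, pvShape n m →
      pvShape n (K.foldl (fun m j => pvUpd m I j) m) ∧
      ∀ i' j', pvEnt (K.foldl (fun m j => pvUpd m I j) m) i' j' =
        pvEnt m i' j' + (if i' = I ∧ j' ∈ K then 1 else 0) := by
  induction K with
  | nil => intro _ _ m hm; simpa using hm
  | cons j K ih =>
    intro hK hKn m hm
    have hj : j < n := hKn j (List.mem_cons_self)
    have hjK : j ∉ K := (List.nodup_cons.mp hK).1
    have hK' : K.Nodup := (List.nodup_cons.mp hK).2
    have hKn' : ∀ x ∈ K, x < n := fun x hx => hKn x (List.mem_cons_of_mem _ hx)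
    obtain ⟨hsh, hent⟩ := ih hK' hKn' (pvUpd m I j) (pvShape_upd hm j hI)
    refine ⟨hsh, ?_⟩
    intro i' j'
    rw [List.foldl_cons, hent i' j', pvEnt_upd hm hI hj i' j']
    by_cases hii : i' = I
    · subst hii
      by_cases hjj : j' = j
      · subst hjj
        simp [hjK]
      · simp [hjj, List.mem_cons]
    · simp [hii]

theorem pvEnt_fillAux (V l : List String) (Ks : List Nat) :
    Ks.Nodup → (∀ i ∈ Ks, i < V.length) →
    ∀ m, pvShape V.length m →
      pvShape V.length (Ks.foldl (fun m i =>
        if l.contains (V.getD i "") then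
          (List.range V.length).foldl (fun m j =>
            if l.contains (V.getD j "") && !(V.getD i "" == V.getD j "") then pvUpd m i j else m) m
        else m) m) ∧
      ∀ i' j', j' < V.length →
        pvEnt (Ks.foldl (fun m i =>
          if l.contains (V.getD i "") then
            (List.range V.length).foldl (fun m j =>
              if l.contains (V.getD j "") && !(V.getD i "" == V.getD j "") then pvUpd m i j else m) m
          else m) m) i' j' =
        pvEnt m i' j' +
          (if i' ∈ Ks ∧ (l.contains (V.getD i' "") &&
              (l.contains (V.getD j' "") && !(V.getD i' "" == V.getD j' ""))) = true then 1 else 0) := by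
  induction Ks with
  | nil => intro _ _ m hm; simpa using hm
  | cons i Ks ih =>
    intro hK hKn m hm
    have hi : i < V.length := hKn i List.mem_cons_self
    have hiK : i ∉ Ks := (List.nodup_cons.mp hK).1
    have hK' : Ks.Nodup := (List.nodup_cons.mp hK).2
    have hKn' : ∀ x ∈ Ks, x < V.length := fun x hx => hKn x (List.mem_cons_of_mem _ hx)
    have hstep : pvShape V.length (if l.contains (V.getD i "") = true then
          (List.range V.length).foldl (fun m j =>
            if (l.contains (V.getD j "") && !(V.getD i "" == V.getD j "")) = true then pvUpd m i j else m) m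
        else m) ∧
        ∀ i' j', j' < V.length →
          pvEnt (if l.contains (V.getD i "") = true then
            (List.range V.length).foldl (fun m j =>
              if (l.contains (V.getD j "") && !(V.getD i "" == V.getD j "")) = true then pvUpd m i j else m) m
          else m) i' j' =
          pvEnt m i' j' + (if i' = i ∧ (l.contains (V.getD i' "") &&
            (l.contains (V.getD j' "") && !(V.getD i' "" == V.getD j' ""))) = true then 1 else 0) := by
      by_cases hp : l.contains (V.getD i "") = true
      · rw [if_pos hp, PySem.List.foldl_if_eq_foldl_filter]
        have hnd : ((List.range V.length).filter
            (fun j => l.contains (V.getD j "") && !(V.getD i "" == V.getD j ""))).Nodup :=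
          (List.nodup_range).filter _
        have hlt : ∀ j ∈ (List.range V.length).filter
            (fun j => l.contains (V.getD j "") && !(V.getD i "" == V.getD j "")), j < V.length := by
          intro j hj; exact List.mem_range.mp (List.mem_filter.mp hj).1
        obtain ⟨hsh, hent⟩ := pvEnt_bump i hi _ hnd hlt m hm
        refine ⟨hsh, ?_⟩
        intro i' j' hj'
        rw [hent i' j']
        congr 1
        by_cases hii : i' = i
        · subst hii
          replace hp : (V[i']?.getD "") ∈ l := by simpa using hp
          simp [List.mem_filter, List.mem_range, hj', hp]
        · simp [hii]
      · rw [if_neg hp]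
        refine ⟨hm, ?_⟩
        intro i' j' _
        by_cases hii : i' = i
        · subst hii
          replace hp : ¬ ((V[i']?.getD "") ∈ l) := by simpa using hp
          simp [hp]
        · simp [hii]
    obtain ⟨hsh', hstepent⟩ := hstep
    rw [List.foldl_cons]
    obtain ⟨hsh'', hent⟩ := ih hK' hKn' _ hsh'
    refine ⟨hsh'', ?_⟩
    intro i' j' hj'
    rw [hent i' j' hj', hstepent i' j' hj']
    by_cases hii : i' = i
    · subst hii
      simp [hiK, List.mem_cons]
    · simp [hii, List.mem_cons]

theorem pvShape_fillStep (V l : List String) (m : List (List Int)) (h : pvShape V.length m) :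
    pvShape V.length (pvFillStep V l m) :=
  (pvEnt_fillAux V l (List.range V.length) List.nodup_range
    (fun _ hi => List.mem_range.mp hi) m h).1

theorem pvEnt_fillStep (V l : List String) (m : List (List Int)) (h : pvShape V.length m)
    (i' j' : Nat) (hi : i' < V.length) (hj : j' < V.length) :
    pvEnt (pvFillStep V l m) i' j' =
      pvEnt m i' j' +
        (if (l.contains (V.getD i' "") && (l.contains (V.getD j' "") &&
            !(V.getD i' "" == V.getD j' ""))) = true then 1 else 0) := by
  have h2 := (pvEnt_fillAux V l (List.range V.length) List.nodup_range
    (fun _ hx => List.mem_range.mp hx) m h).2 i' j' hj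
  rw [pvFillStep, h2]
  simp [List.mem_range, hi]

theorem pvEnt_fold (V : List String) (ls : List (List String)) :
    ∀ m, pvShape V.length m → ∀ i' j', i' < V.length → j' < V.length →
      pvEnt (ls.foldl (fun m l => pvFillStep V l m) m) i' j' =
        pvEnt m i' j' +
          (ls.countP (fun l => l.contains (V.getD i' "") && (l.contains (V.getD j' "") &&
            !(V.getD i' "" == V.getD j' ""))) : Int) := by
  induction ls with
  | nil => intro m _ i' j' _ _; simp
  | cons l ls ih =>
    intro m hm i' j' hi hj
    rw [List.foldl_cons, ih (pvFillStep V l m) (pvShape_fillStep V l m hm) i' j' hi hj,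
      pvEnt_fillStep V l m hm i' j' hi hj, List.countP_cons]
    push_cast
    split_ifs <;> omega

theorem pvShape_init (n : Nat) : pvShape n (pvInit n) := by
  refine ⟨by simp [pvInit], ?_⟩
  intro r hr
  obtain ⟨_, _, rfl⟩ := List.mem_map.mp hr
  simp

theorem pvEnt_init (n : Nat) (i j : Nat) : pvEnt (pvInit n) i j = 0 := by
  simp only [pvEnt, pvInit, List.getD_eq_getElem?_getD]
  by_cases hi : i < n
  · rw [List.getElem?_map, List.getElem?_range hi]
    simp [List.getElem?_replicate]
    split_ifs <;> rfl
  · rw [List.getElem?_map, List.getElem?_eq_none (l := List.range n) (by simpa using hi)]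
    rfl

theorem pvVocab_pairwise (ls : List (List String)) : (pvVocab ls).Pairwise (· < ·) :=
  PySem.List.sorted_ofList_pairwise_lt _

theorem pvSorted_getD_ne {u : List String} (hu : u.Pairwise (· < ·)) {i j : Nat}
    (hi : i < u.length) (hj : j < u.length) (hij : i ≠ j) :
    u.getD i "" ≠ u.getD j "" := by
  have hp := (List.pairwise_iff_getElem).mp hu
  rw [List.getD_eq_getElem _ _ hi, List.getD_eq_getElem _ _ hj]
  rcases Nat.lt_or_ge i j with h | h
  · exact ne_of_lt (hp i j hi hj h)
  · exact (ne_of_lt (hp j i hj hi (by omega))).symm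

theorem pvEnt_pvMat (ls : List (List String)) {i j : Nat}
    (hi : i < (pvVocab ls).length) (hj : j < (pvVocab ls).length) (hij : i ≠ j) :
    pvEnt (pvMat ls) i j = pvCnt ls ((pvVocab ls).getD i "") ((pvVocab ls).getD j "") := by
  have hne : (pvVocab ls).getD i "" ≠ (pvVocab ls).getD j "" :=
    pvSorted_getD_ne (pvVocab_pairwise ls) hi hj hij
  rw [pvMat, pvEnt_fold (pvVocab ls) ls (pvInit (pvVocab ls).length)
    (pvShape_init _) i j hi hj, pvEnt_init, pvCnt]
  rw [List.countP_congr (fun l _ => ?_)]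
  · ring
  · simp only [List.getD_eq_getElem?_getD] at hne
    simp [hne]

-- ---------- B side: the pair counts ----------

theorem pvUniq_pairwise (l : List String) : (pvUniq l).Pairwise (· < ·) :=
  PySem.List.sorted_ofList_pairwise_lt _

theorem pvMem_uniq (l : List String) (a : String) : a ∈ pvUniq l ↔ a ∈ l := by
  simp [pvUniq, PySem.List.mem_sorted, PySem.Set.mem_ofList]

theorem pvPairsU_nodup (u : List String) (hu : u.Pairwise (· < ·)) : (pvPairsU u).Nodup := by
  have hnd : u.Nodup := hu.imp ne_of_lt
  rw [pvPairsU, List.nodup_flatMap]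
  constructor
  · intro k _
    exact (((List.drop_sublist (k + 1) u).nodup hnd).map
      (fun a b h => (Prod.ext_iff.mp h).2))
  · rw [List.pairwise_iff_getElem]
    intro p q hp hq hpq
    simp only [List.length_range] at hp hq
    simp only [List.getElem_range]
    intro x hx1 hx2
    obtain ⟨w2, _, rfl⟩ := List.mem_map.mp hx1
    obtain ⟨w2', _, heq⟩ := List.mem_map.mp hx2
    exact pvSorted_getD_ne hu hq hp (by omega) (congrArg Prod.fst heq)

theorem pvMem_pairsU (u : List String) (hu : u.Pairwise (· < ·)) (a b : String) :
    (a, b) ∈ pvPairsU u ↔ a ∈ u ∧ b ∈ u ∧ a < b := by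
  have hpg := (List.pairwise_iff_getElem).mp hu
  rw [pvPairsU]
  simp only [List.mem_flatMap, List.mem_range, List.mem_map]
  constructor
  · rintro ⟨k, hk, w2, hw2, heq⟩
    obtain ⟨rfl, rfl⟩ : u.getD k "" = a ∧ w2 = b := by
      exact ⟨congrArg Prod.fst heq, congrArg Prod.snd heq⟩
    obtain ⟨p, hp, rfl⟩ := List.mem_iff_getElem.mp hw2
    rw [List.length_drop] at hp
    rw [List.getElem_drop]
    rw [List.getD_eq_getElem _ _ hk]
    refine ⟨List.getElem_mem hk, List.getElem_mem (by omega), ?_⟩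
    exact hpg k (k + 1 + p) hk (by omega) (by omega)
  · rintro ⟨ha, hb, hab⟩
    obtain ⟨ka, hka, rfl⟩ := List.mem_iff_getElem.mp ha
    obtain ⟨kb, hkb, rfl⟩ := List.mem_iff_getElem.mp hb
    have hk : ka < kb := by
      rcases Nat.lt_trichotomy ka kb with h | h | h
      · exact h
      · exact absurd hab (by simp [h])
      · exact absurd (hpg kb ka hkb hka h) (by intro hc; exact absurd (hc.trans hab) (lt_irrefl _))
    refine ⟨ka, by omega, u[kb], ?_, ?_⟩
    · refine List.mem_iff_getElem.mpr ⟨kb - (ka + 1), ?_, ?_⟩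
      · rw [List.length_drop]; omega
      · rw [List.getElem_drop]; congr 1; omega
    · rw [List.getD_eq_getElem _ _ hka]

theorem pvCount_pairsU (u : List String) (hu : u.Pairwise (· < ·)) (a b : String) (hab : a < b) :
    (pvPairsU u).count (a, b) = if a ∈ u ∧ b ∈ u then 1 else 0 := by
  rw [(pvPairsU_nodup u hu).count]
  by_cases h : a ∈ u ∧ b ∈ u
  · rw [if_pos ((pvMem_pairsU u hu a b).mpr ⟨h.1, h.2, hab⟩), if_pos h]
  · rw [if_neg (fun hc => h (((pvMem_pairsU u hu a b).mp hc).imp id And.left)), if_neg h]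

theorem pvCounts_eq_flat (ls : List (List String)) :
    pvCounts ls =
      (ls.flatMap (fun l => pvPairsU (pvUniq l))).foldl
        (fun d p => d.insert p (d.getD p 0 + 1)) PySem.Dict.empty := by
  rw [List.foldl_flatMap]
  simp only [pvCounts]
  refine PySem.List.foldl_congr_mem ls _ _ _ ?_
  intro d lst _
  rw [pv_enum_foldl]
  rw [pvPairsU, List.foldl_flatMap]
  refine PySem.List.foldl_congr_mem _ _ _ _ ?_
  intro d' k hk
  rw [List.foldl_map]
  rw [show ((k : Int) + 1) = ((k + 1 : Nat) : Int) by push_cast; ring,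
    PySem.List.slice_from_natCast]
  rfl

theorem pvCounts_getD (ls : List (List String)) (a b : String) (hab : a < b) :
    (pvCounts ls).getD (a, b) 0 = pvCnt ls a b := by
  rw [pvCounts_eq_flat, PySem.Dict.getD_foldl_insert_add_one, PySem.Dict.getD_empty,
    List.count_flatMap, pvCnt]
  rw [show (ls.map (List.count (a, b) ∘ fun l => pvPairsU (pvUniq l))) =
      ls.map (fun l => if (l.contains a && l.contains b) = true then 1 else 0) from
    List.map_congr_left ?_, PySem.List.sum_map_ite_one_zero_nat]
  · norm_num
  · intro l _
    simp only [Function.comp_apply]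
    rw [pvCount_pairsU _ (pvUniq_pairwise l) a b hab]
    by_cases h : a ∈ l ∧ b ∈ l
    · rw [if_pos (by simpa [pvMem_uniq] using h), if_pos (by simpa using h)]
    · rw [if_neg (by simpa [pvMem_uniq] using h), if_neg (by simpa using h)]

-- ---------- the two scans ----------

theorem pvScanB (ls : List (List String)) (V : List String) (hV : V.Pairwise (· < ·))
    (d : PySem.Dict (String × String) Int)
    (hd : ∀ a b : String, a < b → d.getD (a, b) 0 = pvCnt ls a b) :
    (PySem.List.enumerate V).foldl (fun st iw =>
      (PySem.List.slice V (some (iw.1 + 1)) none).foldl (fun st w2 =>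
        if st.1 < d.getD (iw.2, w2) 0 then (d.getD (iw.2, w2) 0, [(iw.2, w2)])
        else if d.getD (iw.2, w2) 0 = st.1 then (st.1, st.2 ++ [(iw.2, w2)])
        else st) st) ((0 : Int), ([] : List (String × String)))
    = (List.range V.length).foldl (fun st i =>
        (V.drop (i + 1)).foldl (fun st w2 =>
          pvStep (pvCnt ls (V.getD i "") w2) (V.getD i "") w2 st) st)
        ((0 : Int), ([] : List (String × String))) := by
  rw [pv_enum_foldl]
  refine PySem.List.foldl_congr_mem _ _ _ _ ?_
  intro st k hk
  have hk' : k < V.length := List.mem_range.mp hk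
  rw [show ((k : Int) + 1) = ((k + 1 : Nat) : Int) by push_cast; ring,
    PySem.List.slice_from_natCast]
  refine PySem.List.foldl_congr_mem _ _ _ _ ?_
  intro st' w2 hw2
  have hlt : V.getD k "" < w2 := by
    obtain ⟨p, hp, rfl⟩ := List.mem_iff_getElem.mp hw2
    rw [List.length_drop] at hp
    rw [List.getElem_drop, List.getD_eq_getElem _ _ hk']
    exact (List.pairwise_iff_getElem.mp hV) k (k + 1 + p) hk' (by omega) (by omega)
  simp only [pvStep, hd _ _ hlt]

theorem pvScanA (ls : List (List String)) (V : List String)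
    (M : List (List Int))
    (hM : ∀ i j : Nat, i < V.length → j < V.length → i ≠ j →
      pvEnt M i j = pvCnt ls (V.getD i "") (V.getD j "")) :
    (PySem.List.pyRange 0 (PySem.List.len V)).foldl (fun st i =>
      (PySem.List.pyRange (i + 1) (PySem.List.len V)).foldl (fun st j =>
        if st.1 < PySem.List.pyGetD (PySem.List.pyGetD M i []) j 0 then
          (PySem.List.pyGetD (PySem.List.pyGetD M i []) j 0,
           [(PySem.List.pyGetD V i "", PySem.List.pyGetD V j "")])
        else if PySem.List.pyGetD (PySem.List.pyGetD M i []) j 0 = st.1 then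
          (st.1, st.2 ++ [(PySem.List.pyGetD V i "", PySem.List.pyGetD V j "")])
        else st) st) ((0 : Int), ([] : List (String × String)))
    = (List.range V.length).foldl (fun st i =>
        (V.drop (i + 1)).foldl (fun st w2 =>
          pvStep (pvCnt ls (V.getD i "") w2) (V.getD i "") w2 st) st)
        ((0 : Int), ([] : List (String × String))) := by
  rw [show PySem.List.len V = ((V.length : Nat) : Int) from PySem.List.len_eq V,
    PySem.List.pyRange_zero_nat, List.foldl_map]
  refine PySem.List.foldl_congr_mem _ _ _ _ ?_
  intro st k hk
  have hk' : k < V.length := List.mem_range.mp hk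
  have h1 : (PySem.List.pyRange ((k : Int) + 1) ((V.length : Nat) : Int)).foldl (fun st j =>
        if st.1 < PySem.List.pyGetD (PySem.List.pyGetD M (k : Int) []) j 0 then
          (PySem.List.pyGetD (PySem.List.pyGetD M (k : Int) []) j 0,
           [(PySem.List.pyGetD V (k : Int) "", PySem.List.pyGetD V j "")])
        else if PySem.List.pyGetD (PySem.List.pyGetD M (k : Int) []) j 0 = st.1 then
          (st.1, st.2 ++ [(PySem.List.pyGetD V (k : Int) "", PySem.List.pyGetD V j "")])
        else st) st =
      (PySem.List.pyRange ((k : Int) + 1) ((V.length : Nat) : Int)).foldl (fun st j =>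
        (fun st w2 => pvStep (pvCnt ls (V.getD k "") w2) (V.getD k "") w2 st) st
          (PySem.List.pyGetD V j "")) st := by
    refine PySem.List.foldl_congr_mem _ _ _ _ ?_
    intro st' j hj
    have hj0 := (PySem.List.mem_pyRange_one.mp hj)
    have hjn : j = ((j.toNat : Nat) : Int) := by omega
    have hjlt : j.toNat < V.length := by omega
    have hkj : k ≠ j.toNat := by omega
    rw [hjn]
    simp only [PySem.List.pyGetD_natCast, pvStep]
    rw [show (M.getD k []).getD j.toNat 0 = pvEnt M k j.toNat from rfl,
      hM k j.toNat hk' hjlt hkj]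
  rw [h1]
  have h2 := PySem.List.foldl_pyRange_pyGetD (a := (k : Int) + 1) V ""
    (fun st w2 => pvStep (pvCnt ls (V.getD k "") w2) (V.getD k "") w2 st) st
    (by positivity)
  rw [show PySem.List.len V = ((V.length : Nat) : Int) from PySem.List.len_eq V] at h2
  rw [h2]
  norm_num

theorem pvFill_eq (V l : List String) (m : List (List Int)) :
    (PySem.List.enumerate V).foldl (fun matrix iw =>
      if l.contains iw.2 then
        (PySem.List.enumerate V).foldl (fun matrix jw =>
          if l.contains jw.2 && !(iw.2 == jw.2) then
            PySem.List.pySetD matrix iw.1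
              (PySem.List.pySetD (PySem.List.pyGetD matrix iw.1 []) jw.1
                (PySem.List.pyGetD (PySem.List.pyGetD matrix iw.1 []) jw.1 0 + 1))
          else matrix) matrix
      else matrix) m = pvFillStep V l m := by
  rw [pv_enum_foldl, pvFillStep]
  refine PySem.List.foldl_congr_mem _ _ _ _ ?_
  intro m' k _
  by_cases hp : l.contains (V.getD k "") = true
  · rw [if_pos hp, if_pos hp, pv_enum_foldl]
    refine PySem.List.foldl_congr_mem _ _ _ _ ?_
    intro m'' j _
    by_cases hc : (l.contains (V.getD j "") && !(V.getD k "" == V.getD j "")) = true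
    · rw [if_pos hc, if_pos hc]
      simp only [PySem.List.pySetD_natCast, PySem.List.pyGetD_natCast, pvUpd]
    · rw [if_neg hc, if_neg hc]
  · rw [if_neg hp, if_neg hp]

theorem pvInit_eq (V : List String) :
    (PySem.List.pyRange 0 (PySem.List.len V)).map
      (fun _ => PySem.List.pyRepeat [(0 : Int)] (PySem.List.len V)) = pvInit V.length := by
  rw [show PySem.List.len V = ((V.length : Nat) : Int) from PySem.List.len_eq V,
    PySem.List.pyRange_zero_nat, List.map_map, pvInit]
  simp only [PySem.List.pyRepeat_singleton, Int.toNat_natCast, Function.comp_def]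
  try rw [List.map_const']
  try simp

theorem pvA_eq_scan (ls : List (List String)) : most_frequent_combination ls = pvScan ls := by
  simp only [most_frequent_combination]
  rw [pv_vocab0_eq]
  rw [show PySem.List.sorted (PySem.Set.ofList (ls.flatMap (fun l => l))) (fun x => x) =
    pvVocab ls from rfl]
  rw [pvInit_eq]
  simp only [pvFill_eq]
  rw [show ls.foldl (fun m l => pvFillStep (pvVocab ls) l m) (pvInit (pvVocab ls).length) =
    pvMat ls from rfl]
  simp only [pvScan]
  exact pvScanA ls (pvVocab ls) (pvMat ls)
    (fun i j hi hj hij => pvEnt_pvMat ls hi hj hij)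

theorem pvB_eq_scan (ls : List (List String)) : most_frequent_combination_alt ls = pvScan ls := by
  simp only [most_frequent_combination_alt]
  rw [show PySem.List.sorted (PySem.Set.ofList (ls.flatMap (fun lst => lst))) (fun x => x) =
    pvVocab ls from rfl]
  rw [show ls.foldl (fun counts lst =>
      let uniq := PySem.List.sorted (PySem.Set.ofList lst) (fun x => x)
      (PySem.List.enumerate uniq).foldl (fun counts iw =>
        (PySem.List.slice uniq (some (iw.1 + 1)) none).foldl (fun counts w2 =>
          counts.insert (iw.2, w2) (counts.getD (iw.2, w2) 0 + 1)) counts) counts)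
      PySem.Dict.empty = pvCounts ls from rfl]
  simp only [pvScan]
  exact pvScanB ls (pvVocab ls) (pvVocab_pairwise ls) (pvCounts ls)
    (fun a b h => pvCounts_getD ls a b h)

-- ===== VERDICT (by name: the statement is the Claim_ definition above) =====
theorem most_frequent_combination_spec : Claim_equal_most_frequent_combination := by
  intro ls _
  unfold Spec_most_frequent_combination
  rw [pvA_eq_scan, pvB_eq_scan]
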